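-- pv_equiv track=rewrite | github.com/Eaglemamba/SterileGMP-Knowledge-Hub | merge.py | build_nav_html
-- ===== SOURCE A (Python) =====
-- SECTION_MAP = [
--     # (file_pattern, nav_id, nav_num, nav_label_en, nav_label_zh, page_range)
--     ("section-00", "intro",  "0",  "Introduction",     "導論與術語表",   "p1-p7"),
--     ("section-01", "sec1",   "1",  "Design Elements",  "設計要素",       "p8-p28"),
--     ("section-02", "sec2",   "2",  "Technologies",     "充填技術",       "p29-p62"),
--     ("section-03", "sec3",   "3",  "Needle Designs",   "針頭設計",       "p63-p69"),
--     ("section-04", "sec4",   "4",  "Functionality",    "系統功能",       "p70-p100"),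
--     ("section-05", "sec5",   "5",  "Dose Control",     "劑量控制",       "p101-p114"),
--     ("section-06", "sec6",   "6",  "Container-Closure","容器密封",       "p115-p117"),
--     ("section-07", "sec7",   "7",  "Closing Systems",  "封蓋系統",       "p118-p128"),
--     ("section-08", "sec8",   "8",  "Interventions",    "介入操作",       "p129-p148"),
--     ("section-09", "sec9",   "9",  "Components",       "組件導入",       "p149-p158"),
--     ("section-10", "sec10",  "10", "Sterilization",    "滅菌系統",       "p159-p167"),
--     ("section-11", "sec11",  "11", "Fluid Pathway",    "流體路徑",       "p168-p178"),
--     ("section-12", "sec12",  "12", "Operations",       "營運操作",       "p179-p190"),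
--     ("section-13", "sec13",  "13", "APS / Media Fills","無菌模擬",       "p191-p198"),
--     ("section-14", "sec14",  "14", "Env. Monitoring",  "環境監控",       "p199-p204"),
--     ("section-15", "sec15",  "15", "Contamination",    "污染控制",       "p205-p208"),
--     ("section-16", "sec16",  "16", "Supplier Mgmt",    "供應商管理",     "p209-p211"),
--     ("section-17", "sec17",  "17", "Validation",       "驗證",           "p212-p214"),
--     ("section-18", "sec18",  "18", "Maintenance",      "維護保養",       "p215-p217"),
--     ("section-19", "sec19",  "19", "Powder Filling",   "粉末充填",       "p218-p221"),
--     ("section-20", "sec20",  "20", "References",       "參考文獻",       "p222-p225"),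
--     ("section-21", "sec21",  "21", "Case Studies",     "案例研究",       "p226-p240"),
--     ("section-22", "sec22",  "22", "Vendors",          "廠商資源",       "p241-p250"),
-- ]
--
-- def build_nav_html(available_sections: set) -> str:
--     """Generate the top navigation bar HTML."""
--     nav_items = []
--     for pattern, nav_id, nav_num, label_en, label_zh, pages in SECTION_MAP:
--         if pattern in available_sections:
--             nav_items.append(
--                 f'            <a href="#{nav_id}" class="nav-item" data-section="{nav_id}">\n'
--                 f'                <span class="nav-num">{nav_num}</span>\n'
--                 f'                <span class="nav-label">{label_en}</span>\n'
--                 f'            </a>'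
--             )
--     return '\n'.join(nav_items)
-- ===== SOURCE B (Python) =====
-- # Only the English labels are data; pattern, nav_id and nav_num are computed from the
-- # section number parsed out of each input string.
-- NAV_LABELS = [
--     "Introduction", "Design Elements", "Technologies", "Needle Designs",
--     "Functionality", "Dose Control", "Container-Closure", "Closing Systems",
--     "Interventions", "Components", "Sterilization", "Fluid Pathway",
--     "Operations", "APS / Media Fills", "Env. Monitoring", "Contamination",
--     "Supplier Mgmt", "Validation", "Maintenance", "Powder Filling",
--     "References", "Case Studies", "Vendors",
-- ]
--
--
-- def build_nav_html(available_sections: set) -> str: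
--     """Generate the top navigation bar HTML (iterate the sorted input, parse the number)."""
--     parts = []
--     # zero-padded names: lexicographic order of valid patterns == numeric order
--     for name in sorted(available_sections):
--         if len(name) == 10 and name.startswith("section-") and name[8:].isdigit():
--             i = int(name[8:])
--             if i < len(NAV_LABELS):
--                 nav_id = "intro" if i == 0 else "sec" + str(i)
--                 parts.append(
--                     f'            <a href="#{nav_id}" class="nav-item" data-section="{nav_id}">\n'
--                     f'                <span class="nav-num">{i}</span>\n'
--                     f'                <span class="nav-label">{NAV_LABELS[i]}</span>\n'
--                     f'            </a>')
--     return "\n".join(parts)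
-- ===== Notes on version B (the rewrite author's own statement) =====
-- stated objective: alternative
-- what changed: B keeps only the English labels as data and iterates the sorted input, parsing the section number out of each 'section-NN' name and computing nav_id/nav_num from it, instead of scanning the fixed 6-column SECTION_MAP with a membership test per row.
import Mathlib
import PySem

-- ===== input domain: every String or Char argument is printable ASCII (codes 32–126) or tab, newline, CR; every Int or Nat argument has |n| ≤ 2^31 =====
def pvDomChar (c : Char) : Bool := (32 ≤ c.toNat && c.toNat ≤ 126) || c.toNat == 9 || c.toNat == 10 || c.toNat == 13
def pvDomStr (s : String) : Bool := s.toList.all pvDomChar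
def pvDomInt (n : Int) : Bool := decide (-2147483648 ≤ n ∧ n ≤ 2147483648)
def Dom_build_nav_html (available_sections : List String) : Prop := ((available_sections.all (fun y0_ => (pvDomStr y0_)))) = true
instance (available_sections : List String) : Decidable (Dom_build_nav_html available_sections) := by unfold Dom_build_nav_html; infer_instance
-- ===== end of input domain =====

-- B iterates the sorted input and PARSES the section number out of each "section-NN" name,
-- keeping only the English labels as data, instead of scanning the fixed 6-column table
-- with a membership test per row (alternative decomposition, no speed claim).
-- The Python parameter is a SET; both ports take its List encoding (distinct elements, see Pre_).

-- ===== PORT A =====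
-- row type: (file_pattern, nav_id, nav_num, nav_label_en, nav_label_zh, page_range)
def pvSectionMap : List (String × String × String × String × String × String) :=
  [ ("section-00", "intro",  "0",  "Introduction",     "導論與術語表",   "p1-p7"),
    ("section-01", "sec1",   "1",  "Design Elements",  "設計要素",       "p8-p28"),
    ("section-02", "sec2",   "2",  "Technologies",     "充填技術",       "p29-p62"),
    ("section-03", "sec3",   "3",  "Needle Designs",   "針頭設計",       "p63-p69"),
    ("section-04", "sec4",   "4",  "Functionality",    "系統功能",       "p70-p100"),
    ("section-05", "sec5",   "5",  "Dose Control",     "劑量控制",       "p101-p114"),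
    ("section-06", "sec6",   "6",  "Container-Closure","容器密封",       "p115-p117"),
    ("section-07", "sec7",   "7",  "Closing Systems",  "封蓋系統",       "p118-p128"),
    ("section-08", "sec8",   "8",  "Interventions",    "介入操作",       "p129-p148"),
    ("section-09", "sec9",   "9",  "Components",       "組件導入",       "p149-p158"),
    ("section-10", "sec10",  "10", "Sterilization",    "滅菌系統",       "p159-p167"),
    ("section-11", "sec11",  "11", "Fluid Pathway",    "流體路徑",       "p168-p178"),
    ("section-12", "sec12",  "12", "Operations",       "營運操作",       "p179-p190"),
    ("section-13", "sec13",  "13", "APS / Media Fills","無菌模擬",       "p191-p198"),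
    ("section-14", "sec14",  "14", "Env. Monitoring",  "環境監控",       "p199-p204"),
    ("section-15", "sec15",  "15", "Contamination",    "污染控制",       "p205-p208"),
    ("section-16", "sec16",  "16", "Supplier Mgmt",    "供應商管理",     "p209-p211"),
    ("section-17", "sec17",  "17", "Validation",       "驗證",           "p212-p214"),
    ("section-18", "sec18",  "18", "Maintenance",      "維護保養",       "p215-p217"),
    ("section-19", "sec19",  "19", "Powder Filling",   "粉末充填",       "p218-p221"),
    ("section-20", "sec20",  "20", "References",       "參考文獻",       "p222-p225"),
    ("section-21", "sec21",  "21", "Case Studies",     "案例研究",       "p226-p240"),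
    ("section-22", "sec22",  "22", "Vendors",          "廠商資源",       "p241-p250") ]

-- the f-string body (identical literal in both Python sources; shared by the two ports)
def pvItem (nav_id nav_num label_en : String) : String :=
  "            <a href=\"#" ++ nav_id ++ "\" class=\"nav-item\" data-section=\"" ++ nav_id ++ "\">\n" ++
  "                <span class=\"nav-num\">" ++ nav_num ++ "</span>\n" ++
  "                <span class=\"nav-label\">" ++ label_en ++ "</span>\n" ++
  "            </a>"

def build_nav_html (available_sections : List String) : String :=
  let nav_items := pvSectionMap.foldl
    (fun acc r =>
      if available_sections.contains r.1 then
        acc ++ [pvItem r.2.1 r.2.2.1 r.2.2.2.1]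
      else acc)
    ([] : List String)
  PySem.Str.join "\n" nav_items

-- ===== PORT B =====
-- NAV_LABELS (the only per-section data B keeps)
def pvNavLabels : List String :=
  [ "Introduction", "Design Elements", "Technologies", "Needle Designs",
    "Functionality", "Dose Control", "Container-Closure", "Closing Systems",
    "Interventions", "Components", "Sterilization", "Fluid Pathway",
    "Operations", "APS / Media Fills", "Env. Monitoring", "Contamination",
    "Supplier Mgmt", "Validation", "Maintenance", "Powder Filling",
    "References", "Case Studies", "Vendors" ]

-- int(name[8:]) cannot raise after the isdigit test, so .getD 0 is exact;
-- pvNavLabels[i] is in range because of the i < len(NAV_LABELS) test, so pyGetD "" is exact.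
def build_nav_html_alt (available_sections : List String) : String :=
  let parts := (PySem.List.sorted available_sections (fun x => x) false).foldl
    (fun parts name =>
      if PySem.Str.len name == 10 && PySem.Str.startswith name "section-" &&
         PySem.Str.strIsdigit (PySem.Str.slice name (some 8) none) then
        let i := (PySem.Int.ofStr? (PySem.Str.slice name (some 8) none)).getD 0
        if i < PySem.List.len pvNavLabels then
          let nav_id := if i == 0 then "intro" else "sec" ++ PySem.Int.toStr i
          parts ++ [pvItem nav_id (PySem.Int.toStr i) (PySem.List.pyGetD pvNavLabels i "")]
        else parts
      else parts)
    ([] : List String)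
  PySem.Str.join "\n" parts

-- ===== PRECONDITION & SPEC =====
-- The Python parameter is a set; Pre_ says the List String argument is its faithful encoding (distinct elements).
def Pre_build_nav_html (available_sections : List String) : Prop := available_sections.Nodup
instance (available_sections : List String) : Decidable (Pre_build_nav_html available_sections) := by
  unfold Pre_build_nav_html; infer_instance

def pvWitness_build_nav_html : List String := ["section-03", "section-00", "nope"]

def Spec_build_nav_html (available_sections : List String) (out : String) : Prop := out = build_nav_html_alt available_sections
instance (available_sections : List String) (out : String) : Decidable (Spec_build_nav_html available_sections out) := by unfold Spec_build_nav_html; infer_instance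

-- ===== CLAIM =====
def Claim_equal_build_nav_html : Prop := ∀ (available_sections : List String), Dom_build_nav_html available_sections → Pre_build_nav_html available_sections → Spec_build_nav_html available_sections (build_nav_html available_sections)

-- ===== LEMMAS AND PROOFS =====

-- the pattern column of A's table, the order B's lexicographic sort must reproduce
def pvPatterns : List String := pvSectionMap.map (·.1)

lemma pvPatterns_pairwise_lt : pvPatterns.Pairwise (· < ·) := by
  have h : pvPatterns.Pairwise (fun a b => a.toList < b.toList) := by decide
  exact h.imp (fun hx => String.lt_iff_toList_lt.mpr hx)

-- B's loop-body test and emitted item, as standalone functions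
def pvP (name : String) : Bool :=
  (PySem.Str.len name == 10 && PySem.Str.startswith name "section-" &&
   PySem.Str.strIsdigit (PySem.Str.slice name (some 8) none)) &&
  decide ((PySem.Int.ofStr? (PySem.Str.slice name (some 8) none)).getD 0 < PySem.List.len pvNavLabels)

def pvF (name : String) : String :=
  let i := (PySem.Int.ofStr? (PySem.Str.slice name (some 8) none)).getD 0
  pvItem (if i == 0 then "intro" else "sec" ++ PySem.Int.toStr i)
    (PySem.Int.toStr i) (PySem.List.pyGetD pvNavLabels i "")

lemma pv_step_eq :
    (fun (parts : List String) name =>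
      if PySem.Str.len name == 10 && PySem.Str.startswith name "section-" &&
         PySem.Str.strIsdigit (PySem.Str.slice name (some 8) none) then
        let i := (PySem.Int.ofStr? (PySem.Str.slice name (some 8) none)).getD 0
        if i < PySem.List.len pvNavLabels then
          let nav_id := if i == 0 then "intro" else "sec" ++ PySem.Int.toStr i
          parts ++ [pvItem nav_id (PySem.Int.toStr i) (PySem.List.pyGetD pvNavLabels i "")]
        else parts
      else parts)
    = fun parts name => if pvP name then parts ++ [pvF name] else parts := by
  funext parts name
  by_cases h1 : (PySem.Str.len name == 10 && PySem.Str.startswith name "section-" &&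
      PySem.Str.strIsdigit (PySem.Str.slice name (some 8) none)) = true <;>
    by_cases h2 : (PySem.Int.ofStr? (PySem.Str.slice name (some 8) none)).getD 0 < PySem.List.len pvNavLabels <;>
      (simp_all [pvP, pvF]; try (split_ifs <;> simp_all))

-- every table pattern passes B's test
lemma pvP_of_mem (x : String) (hx : x ∈ pvPatterns) : pvP x = true := by
  fin_cases hx <;> decide

-- the hard direction: any string passing B's test IS one of the 23 table patterns
set_option maxHeartbeats 2000000 in
lemma mem_of_pvP (x : String) (h : pvP x = true) : x ∈ pvPatterns := by
  unfold pvP at h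
  simp only [Bool.and_eq_true, beq_iff_eq, decide_eq_true_eq] at h
  obtain ⟨⟨⟨hlen, hpre⟩, hdig⟩, hlt⟩ := h
  have hlen' : x.toList.length = 10 := by
    simp [PySem.Str.len] at hlen; exact_mod_cast hlen
  have hpre' : "section-".toList <+: x.toList := by
    exact (PySem.Chars.startswith_iff _ _).mp (by simpa using hpre)
  obtain ⟨rest, hrest⟩ := hpre'
  have hr2 : rest.length = 2 := by
    have h9 := congrArg List.length hrest
    simp [hlen'] at h9; omega
  match rest, hr2 with
  | [c1, c2], _ =>
  have htail : (PySem.Str.slice x (some 8) none).toList = [c1, c2] := by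
    rw [PySem.Str.toList_slice, PySem.Chars.slice_eq_listSlice,
      PySem.List.slice_from x.toList (by omega : (0:Int) ≤ 8), ← hrest]
    rfl
  have hdig' : (48 ≤ c1.toNat ∧ c1.toNat ≤ 57) ∧ (48 ≤ c2.toNat ∧ c2.toNat ≤ 57) := by
    have hd := (PySem.Str.strIsdigit_eq _) ▸ hdig
    simp [PySem.Chars.strIsdigit, htail, PySem.Chars.isdigit, Char.le_def,
      UInt32.le_iff_toNat_le] at hd
    exact ⟨hd.1, hd.2⟩
  have hval : (PySem.Int.ofChars? [c1, c2]).getD 0 < 23 := by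
    have he : PySem.Int.ofStr? (PySem.Str.slice x (some 8) none)
        = PySem.Int.ofChars? [c1, c2] := by
      simp [PySem.Int.ofStr?, htail]
    rw [he] at hlt
    simpa using hlt
  have hx : x = String.ofList ("section-".toList ++ [c1, c2]) :=
    String.toList_inj.mp (by simp [← hrest])
  rw [hx]
  obtain ⟨⟨h1a, h1b⟩, ⟨h2a, h2b⟩⟩ := hdig'
  have e1 : c1 = Char.ofNat c1.toNat := (Char.ofNat_toNat c1).symm
  have e2 : c2 = Char.ofNat c2.toNat := (Char.ofNat_toNat c2).symm
  set n1 := c1.toNat with hn1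
  set n2 := c2.toNat with hn2
  rw [e1, e2] at hval ⊢
  clear_value n1 n2
  interval_cases n1 <;> interval_cases n2 <;> revert hval <;> decide

-- B's filtered, sorted input is exactly the pattern column of A's filtered table
lemma pv_filter_sorted_eq (avail : List String) (hnd : avail.Nodup) :
    (PySem.List.sorted avail (fun x => x) false).filter pvP
      = (pvSectionMap.filter (fun r => avail.contains r.1)).map (·.1) := by
  have hperm1 : ((PySem.List.sorted avail (fun x => x) false).filter pvP).Perm
      (avail.filter pvP) := (PySem.List.sorted_perm avail _ false).filter pvP
  have hperm2 : (avail.filter pvP).Perm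
      ((pvSectionMap.filter (fun r => avail.contains r.1)).map (·.1)) := by
    rw [(List.perm_ext_iff_of_nodup (hnd.filter _) ?_)]
    · intro y
      simp only [List.mem_filter, List.mem_map]
      constructor
      · rintro ⟨hy, hp⟩
        obtain ⟨r, hrm, rfl⟩ := List.mem_map.mp (mem_of_pvP y hp)
        exact ⟨r, ⟨hrm, by simpa using hy⟩, rfl⟩
      · rintro ⟨r, ⟨hrm, hc⟩, rfl⟩
        exact ⟨by simpa using hc, pvP_of_mem _ (List.mem_map_of_mem hrm)⟩
    · have h1 : ((pvSectionMap.filter (fun r => avail.contains r.1)).map (·.1)).Sublist pvPatterns :=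
        (pvSectionMap.filter_sublist).map (·.1)
      exact (by decide : pvPatterns.Nodup).sublist h1
  have hlt_l : ((PySem.List.sorted avail (fun x => x) false).filter pvP).Pairwise (· < ·) := by
    have hle : ((PySem.List.sorted avail (fun x => x) false).filter pvP).Pairwise (· ≤ ·) :=
      (PySem.List.sorted_pairwise avail (fun x => x) ).filter pvP
    have hne : ((PySem.List.sorted avail (fun x => x) false).filter pvP).Nodup :=
      hperm1.nodup_iff.mpr (hnd.filter _)
    exact (hle.and hne).imp (fun ⟨ha, hb⟩ => lt_of_le_of_ne ha hb)
  have hlt_r : ((pvSectionMap.filter (fun r => avail.contains r.1)).map (·.1)).Pairwise (· < ·) :=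
    pvPatterns_pairwise_lt.sublist ((pvSectionMap.filter_sublist).map (·.1))
  exact List.eq_of_perm_of_sorted
    (fun a b _ _ h1 h2 => absurd h2 (lt_asymm h1)) hlt_l hlt_r (hperm1.trans hperm2)

set_option maxRecDepth 40000 in
set_option maxHeartbeats 2000000 in
lemma pvF_eq_item : ∀ r ∈ pvSectionMap, pvF r.1 = pvItem r.2.1 r.2.2.1 r.2.2.2.1 := by decide

-- ===== VERDICT (by name: the statement is the Claim_ definition above) =====
set_option maxHeartbeats 1000000 in
theorem build_nav_html_spec : Claim_equal_build_nav_html := by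
  intro avail hdom hpre
  unfold Spec_build_nav_html
  simp only [build_nav_html, build_nav_html_alt]
  rw [pv_step_eq]
  rw [PySem.List.foldl_append_if pvP pvF _ []]
  rw [PySem.List.foldl_append_if (fun r => avail.contains r.1)
        (fun r => pvItem r.2.1 r.2.2.1 r.2.2.2.1) pvSectionMap []]
  rw [pv_filter_sorted_eq avail hpre, List.map_map]
  simp only [List.nil_append]
  refine congrArg (PySem.Str.join "\n") ?_
  apply List.map_congr_left
  intro r hr
  exact (pvF_eq_item r (List.mem_of_mem_filter hr)).symm
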